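-- pv_equiv track=rewrite | github.com/Danielx2003/Events-Booking-System | nea.py | ScoreForEarnings
-- ===== SOURCE A (Python) =====
-- def ScoreForEarnings(attendantScores, attendantEarnings):
--     attendantEarnings = attendantEarnings[::-1] #flip list so lowest earnings is first
--     n = 7
--     for each in attendantEarnings: #loop through list
--         n = n- 2
--         if n > 0:
--             attendantScores[each[1]] += n
--
--     return attendantScores
-- ===== SOURCE B (Python) =====
-- def ScoreForEarnings(attendantScores, attendantEarnings):
--     # Fixed weight table instead of reversing the whole list with a counter:
--     # weight 5/3/1 for the last/second-last/third-last earner, when present.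
--     # Mutates attendantScores in place, like the original.
--     for i, w in enumerate((5, 3, 1)):
--         if i < len(attendantEarnings):
--             attendantScores[attendantEarnings[-1 - i][1]] += w
--     return attendantScores
-- ===== Notes on version B (the rewrite author's own statement) =====
-- stated objective: simpler
-- what changed: Instead of reversing the whole earnings list and running a decrementing counter over every element, B walks a fixed 3-entry weight table (5,3,1) and indexes the last three earners from the end, guarded by the list length.
import Mathlib
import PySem

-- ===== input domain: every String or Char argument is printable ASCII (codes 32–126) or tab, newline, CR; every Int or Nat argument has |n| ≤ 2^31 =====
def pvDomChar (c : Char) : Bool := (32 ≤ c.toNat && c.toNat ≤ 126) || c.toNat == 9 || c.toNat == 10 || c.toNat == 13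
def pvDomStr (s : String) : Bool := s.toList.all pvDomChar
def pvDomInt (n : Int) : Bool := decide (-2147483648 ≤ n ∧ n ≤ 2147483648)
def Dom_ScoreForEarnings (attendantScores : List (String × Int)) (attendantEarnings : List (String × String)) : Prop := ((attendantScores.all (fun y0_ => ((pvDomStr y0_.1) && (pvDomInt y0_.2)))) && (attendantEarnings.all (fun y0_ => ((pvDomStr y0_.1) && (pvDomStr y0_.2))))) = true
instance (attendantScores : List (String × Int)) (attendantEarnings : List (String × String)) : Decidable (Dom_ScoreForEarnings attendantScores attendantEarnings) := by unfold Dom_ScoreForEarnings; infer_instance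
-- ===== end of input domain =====

-- B drops the full-list reversal and decrementing counter in favour of a fixed
-- weight table (5,3,1) indexed from the end of the list (objective: simpler).
-- Both versions mutate the attendantScores dict in place identically; the
-- equivalence proved here is about the returned value.

-- shared dict primitive: `d[k] += n` on the association list (first matching key)
def pyDictAdd : List (String × Int) → String → Int → List (String × Int)
  | [], _, _ => []
  | (k, v) :: rest, key, n =>
      if k == key then (k, v + n) :: rest else (k, v) :: pyDictAdd rest key n

-- ===== PORT A =====
def ScoreForEarnings (attendantScores : List (String × Int)) (attendantEarnings : List (String × String)) : List (String × Int) :=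
  let flipped := (PySem.List.slice? attendantEarnings none none (-1)).getD []  -- attendantEarnings[::-1]
  (flipped.foldl
    (fun st each =>
      let n := st.1 - 2
      if n > 0 then (n, pyDictAdd st.2 each.2 n) else (n, st.2))
    ((7 : Int), attendantScores)).2

-- ===== PORT B =====
def ScoreForEarnings_alt (attendantScores : List (String × Int)) (attendantEarnings : List (String × String)) : List (String × Int) :=
  (PySem.List.enumerate [(5 : Int), 3, 1]).foldl
    (fun sc iw =>
      if iw.1 < (attendantEarnings.length : Int) then
        match PySem.List.pyGet? attendantEarnings (-1 - iw.1) with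
        | some e => pyDictAdd sc e.2 iw.2
        | none => sc
      else sc)
    attendantScores

-- ===== PRECONDITION & SPEC =====
-- Pre_ excludes (a) earnings among the last three whose key is absent from the
-- scores dict — Python A raises KeyError there (so does B) — and (b) association
-- lists with duplicate keys, which cannot arise from a Python dict.
def Pre_ScoreForEarnings (attendantScores : List (String × Int)) (attendantEarnings : List (String × String)) : Prop :=
  (attendantScores.map Prod.fst).Nodup ∧
  ∀ e ∈ attendantEarnings.drop (attendantEarnings.length - 3),
      e.2 ∈ attendantScores.map Prod.fst
instance (attendantScores : List (String × Int)) (attendantEarnings : List (String × String)) : Decidable (Pre_ScoreForEarnings attendantScores attendantEarnings) := by unfold Pre_ScoreForEarnings; infer_instance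

def pvWitness_ScoreForEarnings : (List (String × Int)) × (List (String × String)) :=
  ([("a", 0), ("b", 0)], [("10", "a"), ("20", "b")])

def Spec_ScoreForEarnings (attendantScores : List (String × Int)) (attendantEarnings : List (String × String)) (out : List (String × Int)) : Prop := out = ScoreForEarnings_alt attendantScores attendantEarnings
instance (attendantScores : List (String × Int)) (attendantEarnings : List (String × String)) (out : List (String × Int)) : Decidable (Spec_ScoreForEarnings attendantScores attendantEarnings out) := by unfold Spec_ScoreForEarnings; infer_instance

-- ===== CLAIM (what is proved, stated in full; the proofs are below) =====
def Claim_equal_ScoreForEarnings : Prop := ∀ (attendantScores : List (String × Int)) (attendantEarnings : List (String × String)), Dom_ScoreForEarnings attendantScores attendantEarnings → Pre_ScoreForEarnings attendantScores attendantEarnings → Spec_ScoreForEarnings attendantScores attendantEarnings (ScoreForEarnings attendantScores attendantEarnings)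

-- ===== LEMMAS AND PROOFS =====

-- once the counter has fallen to ≤ 1 (i.e. after three iterations), A's loop
-- never touches the scores again
theorem foldA_noop (l : List (String × String)) (n : Int) (sc : List (String × Int)) (h : n ≤ 1) :
    (l.foldl
      (fun st each =>
        let n := st.1 - 2
        if n > 0 then (n, pyDictAdd st.2 each.2 n) else (n, st.2))
      (n, sc)).2 = sc := by
  induction l generalizing n with
  | nil => rfl
  | cons x xs ih =>
      simp only [List.foldl_cons]
      have : ¬ (n - 2 > 0) := by omega
      simp only [this, if_false]
      exact ih (n - 2) (by omega)

-- one guarded step of B's loop, abstracted for the proof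
def bstep (earnings : List (String × String)) (sc : List (String × Int)) (i w : Int) : List (String × Int) :=
  if i < (earnings.length : Int) then
    match PySem.List.pyGet? earnings (-1 - i) with
    | some e => pyDictAdd sc e.2 w
    | none => sc
  else sc

theorem alt_eq_bstep (sc : List (String × Int)) (earnings : List (String × String)) :
    ScoreForEarnings_alt sc earnings = bstep earnings (bstep earnings (bstep earnings sc 0 5) 1 3) 2 1 := by
  rfl

-- xs[-1-i] is (reverse xs)[i]
theorem pyGet?_neg_rev {α : Type} (xs : List α) (i : Nat) (h : i < xs.length) :
    PySem.List.pyGet? xs (-1 - (i : Int)) = xs.reverse[i]? := by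
  rw [PySem.List.pyGet?_neg xs (by omega) (by omega), List.getElem?_reverse h]
  congr 1
  omega

theorem bstep_eval (r : List (String × String)) (sc : List (String × Int)) (w : Int) (i : Nat)
    (h : i < r.length) :
    bstep r.reverse sc (i : Int) w =
      (match r[i]? with
       | some e => pyDictAdd sc e.2 w
       | none => sc) := by
  unfold bstep
  rw [if_pos (by rw [List.length_reverse]; exact_mod_cast h)]
  rw [pyGet?_neg_rev r.reverse i (by simpa using h)]
  simp [List.reverse_reverse]

theorem bstep_oob (r : List (String × String)) (sc : List (String × Int)) (w i : Int)
    (h : (r.length : Int) ≤ i) :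
    bstep r.reverse sc i w = sc := by
  unfold bstep
  rw [if_neg (by rw [List.length_reverse]; omega)]

-- ===== VERDICT (by name: the statement is the Claim_ definition above) =====

theorem ScoreForEarnings_spec : Claim_equal_ScoreForEarnings := by
  intro scores earnings _hdom _hpre
  unfold Spec_ScoreForEarnings
  obtain ⟨r, rfl⟩ : ∃ r : List (String × String), earnings = r.reverse :=
    ⟨earnings.reverse, (List.reverse_reverse _).symm⟩
  rw [alt_eq_bstep]
  unfold ScoreForEarnings
  rw [PySem.List.slice?_none_none_neg_one]
  simp only [Option.getD_some, List.reverse_reverse]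
  match r with
  | [] =>
      rw [bstep_oob _ _ _ _ (by simp), bstep_oob _ _ _ _ (by simp), bstep_oob _ _ _ _ (by simp)]
      rfl
  | [p] =>
      rw [show (0 : Int) = ((0 : Nat) : Int) by norm_num, bstep_eval _ _ _ 0 (by simp),
        bstep_oob _ _ _ _ (by simp), bstep_oob _ _ _ _ (by simp)]
      rfl
  | [p, q] =>
      rw [show (0 : Int) = ((0 : Nat) : Int) by norm_num, bstep_eval _ _ _ 0 (by simp),
        show (1 : Int) = ((1 : Nat) : Int) by norm_num, bstep_eval _ _ _ 1 (by simp),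
        bstep_oob _ _ _ _ (by simp)]
      rfl
  | p :: q :: s :: rest =>
      rw [show (0 : Int) = ((0 : Nat) : Int) by norm_num, bstep_eval _ _ _ 0 (by simp),
        show (1 : Int) = ((1 : Nat) : Int) by norm_num, bstep_eval _ _ _ 1 (by simp),
        show (2 : Int) = ((2 : Nat) : Int) by norm_num, bstep_eval _ _ _ 2 (by simp)]
      exact foldA_noop rest 1 _ (by omega)
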